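-- pv_equiv track=rewrite | github.com/MihaiAC/miscellaneous-projects | final_year_scripts/TTDS/assignment3/build_index.py | calculate_optimal_partitions
-- ===== SOURCE A (Python) =====
-- from typing import List, Optional, Dict
--
-- def calculate_optimal_partitions(nr_lines:int, n:int) -> Dict[int, int]:
--     div = nr_lines // n
--     mod = nr_lines % n
--     partitions = []
--     for _ in range(n):
--         x = div
--         if mod > 0:
--             mod -= 1
--             x += 1
--         partitions.append(x)
--
--     # Accumulate values:
--     for ii in range(1, n):
--         partitions[ii] += partitions[ii-1]
--
--     partitions_dict = dict()
--     for ii in range(n):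
--         partitions_dict[ii] = partitions[ii]
--
--     return partitions_dict
-- ===== SOURCE B (Python) =====
-- def calculate_optimal_partitions(nr_lines: int, n: int):
--     # closed form: divmod first (preserves ZeroDivisionError for n == 0),
--     # then the cumulative boundary at index i is (i+1)*div plus the number
--     # of 'plus-one' partitions among the first i+1, i.e. min(i+1, mod).
--     div, mod = divmod(nr_lines, n)
--     return {i: (i + 1) * div + min(i + 1, mod) for i in range(n)}
-- ===== Notes on version B (the rewrite author's own statement) =====
-- stated objective: simpler
-- what changed: Replaced the three loops (partition-size building with a decrementing remainder, in-place prefix summation, dict population) by a single dict comprehension with the closed form (i+1)*div + min(i+1, mod).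
import Mathlib
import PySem

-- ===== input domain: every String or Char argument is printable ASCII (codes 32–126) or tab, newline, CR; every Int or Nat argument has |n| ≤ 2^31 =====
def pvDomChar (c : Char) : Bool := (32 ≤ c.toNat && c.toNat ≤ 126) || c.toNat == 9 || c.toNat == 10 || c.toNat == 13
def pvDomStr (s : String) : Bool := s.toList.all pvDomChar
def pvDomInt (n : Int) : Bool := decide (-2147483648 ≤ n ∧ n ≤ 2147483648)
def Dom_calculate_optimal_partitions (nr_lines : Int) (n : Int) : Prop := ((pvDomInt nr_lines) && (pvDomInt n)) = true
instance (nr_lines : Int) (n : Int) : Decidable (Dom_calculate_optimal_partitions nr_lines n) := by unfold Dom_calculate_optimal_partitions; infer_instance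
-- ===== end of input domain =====

-- B replaces A's three loops by one closed-form dict comprehension (objective: simpler).

-- ===== PORT A =====
def calculate_optimal_partitions (nr_lines : Int) (n : Int) : List (Int × Int) :=
  let div := PySem.Int.floordiv nr_lines n
  -- for _ in range(n): build partition sizes, decrementing the remainder
  let st := (PySem.List.pyRange 0 n 1).foldl
      (fun (st : List Int × Int) _ =>
        let x := div
        if st.2 > 0 then (st.1 ++ [x + 1], st.2 - 1) else (st.1 ++ [x], st.2))
      ([], PySem.Int.mod nr_lines n)
  -- for ii in range(1, n): partitions[ii] += partitions[ii-1]  (indices here are ≥ 1 and < len, so pyGetD/.set ii.toNat are exact)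
  let parts2 := (PySem.List.pyRange 1 n 1).foldl
      (fun ps ii =>
        ps.set ii.toNat (PySem.List.pyGetD ps ii 0 + PySem.List.pyGetD ps (ii - 1) 0))
      st.1
  -- for ii in range(n): partitions_dict[ii] = partitions[ii]
  ((PySem.List.pyRange 0 n 1).foldl
      (fun d ii => PySem.Dict.insert d ii (PySem.List.pyGetD parts2 ii 0))
      PySem.Dict.empty).items

-- ===== PORT B =====
def calculate_optimal_partitions_alt (nr_lines : Int) (n : Int) : List (Int × Int) :=
  match PySem.Int.divmod? nr_lines n with
  | none => []   -- n = 0: divmod raises ZeroDivisionError; outside Pre_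
  | some (div, mod) =>
      (PySem.List.pyRange 0 n 1).map (fun i => (i, (i + 1) * div + min (i + 1) mod))

-- ===== PRECONDITION & SPEC =====
-- Pre_ excludes exactly n = 0, where both Pythons raise ZeroDivisionError.
def Pre_calculate_optimal_partitions (nr_lines : Int) (n : Int) : Prop := n ≠ 0
instance (nr_lines : Int) (n : Int) : Decidable (Pre_calculate_optimal_partitions nr_lines n) := by unfold Pre_calculate_optimal_partitions; infer_instance
def pvWitness_calculate_optimal_partitions : Int × Int := (7, 3)

def Spec_calculate_optimal_partitions (nr_lines : Int) (n : Int) (out : List (Int × Int)) : Prop := out = calculate_optimal_partitions_alt nr_lines n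
instance (nr_lines : Int) (n : Int) (out : List (Int × Int)) : Decidable (Spec_calculate_optimal_partitions nr_lines n out) := by unfold Spec_calculate_optimal_partitions; infer_instance

-- ===== CLAIM (what is proved, stated in full; the proofs are below) =====
def Claim_equal_calculate_optimal_partitions : Prop := ∀ (nr_lines : Int) (n : Int), Dom_calculate_optimal_partitions nr_lines n → Pre_calculate_optimal_partitions nr_lines n → Spec_calculate_optimal_partitions nr_lines n (calculate_optimal_partitions nr_lines n)

-- ===== LEMMAS AND PROOFS =====

-- reference list: after processing accumulation indices 1..t, entries j ≤ t hold the
-- prefix sum (j+1)*d + min (j+1) m, entries j > t still hold the size d + [j<m].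
def refList (d m t : Int) (N : Nat) : List Int :=
  (List.range N).map (fun (j : Nat) => if (j : Int) ≤ t then ((j : Int) + 1) * d + min ((j : Int) + 1) m
                               else d + (if (j : Int) < m then 1 else 0))

lemma const_map_range (d m : Int) (hm : ¬ m > 0) (k : Nat) :
    (List.range k).map (fun (j : Nat) => if (j : Int) < m then d + 1 else d) = List.replicate k d := by
  have h := List.eq_replicate_of_mem
      (l := (List.range k).map fun (j : Nat) => if (j : Int) < m then d + 1 else d) (a := d) ?_
  · simpa using h
  · intro b hb
    simp only [List.mem_map] at hb
    obtain ⟨j, _, rfl⟩ := hb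
    rw [if_neg (by omega)]

lemma loop1_spec (d : Int) : ∀ (l : List Int) (acc : List Int) (m : Int),
    (l.foldl (fun (st : List Int × Int) _ =>
        if st.2 > 0 then (st.1 ++ [d + 1], st.2 - 1) else (st.1 ++ [d], st.2)) (acc, m)).1
      = acc ++ (List.range l.length).map (fun (j : Nat) => if (j : Int) < m then d + 1 else d) := by
  intro l
  induction l with
  | nil => intro acc m; simp
  | cons hd tl ih =>
    intro acc m
    simp only [List.foldl_cons, List.length_cons]
    by_cases hm : m > 0
    · rw [if_pos hm, ih]
      have key : (List.range (tl.length + 1)).map (fun (j : Nat) => if (j : Int) < m then d + 1 else d)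
          = (d + 1) :: (List.range tl.length).map
              (fun (j : Nat) => if (j : Int) < m - 1 then d + 1 else d) := by
        rw [List.range_succ_eq_map, List.map_cons, List.map_map]
        congr 1
        · rw [if_pos (by exact_mod_cast hm)]
        · refine List.map_congr_left (fun j _ => ?_)
          simp only [Function.comp_apply]
          exact if_congr (by push_cast; omega) rfl rfl
      rw [key]
      simp
    · rw [if_neg hm, ih, const_map_range d m hm, const_map_range d m hm, List.replicate_succ]
      simp

lemma refList_zero (d m : Int) (hm : 0 ≤ m) (N : Nat) :
    refList d m 0 N = (List.range N).map (fun (j : Nat) => if (j : Int) < m then d + 1 else d) := by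
  unfold refList
  refine List.map_congr_left (fun j _ => ?_)
  by_cases hj : (j : Int) ≤ 0
  · have hj0 : (j : Int) = 0 := by omega
    rw [if_pos hj, hj0]
    by_cases h0 : (0 : Int) < m
    · rw [if_pos h0]
      have : min (0 + 1 : Int) m = 1 := by omega
      rw [this]; ring
    · rw [if_neg h0]
      have : min (0 + 1 : Int) m = 0 := by omega
      rw [this]; ring
  · rw [if_neg hj]
    by_cases h : (j : Int) < m
    · rw [if_pos h, if_pos h]
    · rw [if_neg h, if_neg h]; ring

lemma getElem_refList (d m t : Int) (N : Nat) (i : Nat) (hi : i < (refList d m t N).length) :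
    (refList d m t N)[i] = (if (i : Int) ≤ t then ((i : Int) + 1) * d + min ((i : Int) + 1) m
                            else d + (if (i : Int) < m then 1 else 0)) := by
  unfold refList at hi ⊢
  simp at hi
  simp

lemma length_refList (d m t : Int) (N : Nat) : (refList d m t N).length = N := by
  simp [refList]

lemma loop2_spec (d m : Int) (N : Nat) :
    ∀ c : Int, 1 ≤ c → c ≤ (N : Int) →
    (PySem.List.pyRange 1 c 1).foldl
      (fun ps ii => ps.set ii.toNat (PySem.List.pyGetD ps ii 0 + PySem.List.pyGetD ps (ii - 1) 0))
      (refList d m 0 N)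
    = refList d m (c - 1) N := by
  intro c hc
  induction c, hc using Int.le_induction with
  | base => intro _; rw [PySem.List.pyRange_one_eq_nil (by omega)]; simp
  | succ c hc ih =>
    intro hcN
    rw [PySem.List.pyRange_one_succ_right (by omega), List.foldl_append, ih (by omega)]
    simp only [List.foldl_cons, List.foldl_nil]
    have hcN' : c < (N : Int) := by omega
    have hc0 : (0 : Int) ≤ c := by omega
    have hlen : (refList d m (c - 1) N).length = N := length_refList _ _ _ _
    have hget1 : PySem.List.pyGetD (refList d m (c - 1) N) c 0
        = d + (if c < m then 1 else 0) := by
      rw [PySem.List.pyGetD_eq_getElem _ _ hc0 (by simp [hlen]; omega)]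
      rw [getElem_refList _ _ _ _ _ (by omega)]
      rw [Int.toNat_of_nonneg hc0, if_neg (by omega)]
    have hget2 : PySem.List.pyGetD (refList d m (c - 1) N) (c - 1) 0
        = c * d + min c m := by
      rw [PySem.List.pyGetD_eq_getElem _ _ (by omega) (by simp [hlen]; omega)]
      rw [getElem_refList _ _ _ _ _ (by omega)]
      rw [Int.toNat_of_nonneg (by omega : (0:Int) ≤ c - 1), if_pos (by omega)]
      have : (c - 1 : Int) + 1 = c := by ring
      rw [this]
    rw [hget1, hget2]
    refine List.ext_getElem (by simp [hlen, length_refList]) (fun i h1 h2 => ?_)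
    rw [List.getElem_set]
    rw [getElem_refList _ _ _ _ _ h2]
    by_cases hic : c.toNat = i
    · rw [if_pos hic]
      have hci : (i : Int) = c := by omega
      have hmin : min (c + 1) m = min c m + (if c < m then 1 else 0) := by
        by_cases h : c < m
        · rw [if_pos h]; omega
        · rw [if_neg h]; omega
      rw [hci, if_pos (show (c : Int) ≤ c + 1 - 1 by omega), hmin]
      ring
    · rw [if_neg hic]
      rw [getElem_refList _ _ _ _ _ (by simp [hlen] at h1; simp [length_refList]; omega)]
      have hne : (i : Int) ≠ c := by omega
      by_cases h : (i : Int) ≤ c - 1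
      · rw [if_pos h, if_pos (show (i : Int) ≤ c + 1 - 1 by omega)]
      · rw [if_neg h, if_neg (show ¬ (i : Int) ≤ c + 1 - 1 by omega)]

lemma dict_loop_spec (n : Int) (parts2 : List Int) :
    ((PySem.List.pyRange 0 n 1).foldl
      (fun d ii => PySem.Dict.insert d ii (PySem.List.pyGetD parts2 ii 0))
      PySem.Dict.empty).items
    = (PySem.List.pyRange 0 n 1).map (fun ii => (ii, PySem.List.pyGetD parts2 ii 0)) := by
  have := PySem.Dict.items_foldl_insert_fresh (l := PySem.List.pyRange 0 n 1)
      (k := fun a => a) (v := fun ii => PySem.List.pyGetD parts2 ii 0)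
      (d := PySem.Dict.empty)
      (by intro a _; simp)
      (by simp [List.map_id']; exact PySem.List.nodup_pyRange_one 0 n)
  simpa using this

-- ===== VERDICT (by name: the statement is the Claim_ definition above) =====
theorem calculate_optimal_partitions_spec : Claim_equal_calculate_optimal_partitions := by
  intro nr_lines n _ hn
  have hn0 : n ≠ 0 := hn
  unfold Spec_calculate_optimal_partitions
  unfold calculate_optimal_partitions calculate_optimal_partitions_alt
  have hdm : PySem.Int.divmod? nr_lines n
      = some (PySem.Int.floordiv nr_lines n, PySem.Int.mod nr_lines n) := by
    simp [PySem.Int.divmod?, PySem.Int.floordiv, PySem.Int.mod, hn0]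
  rw [hdm]
  by_cases hpos : 0 < n
  · set d := PySem.Int.floordiv nr_lines n with hd
    set m := PySem.Int.mod nr_lines n with hm
    have hm0 : 0 ≤ m := PySem.Int.mod_nonneg nr_lines hpos
    have hmn : m < n := PySem.Int.mod_lt nr_lines hpos
    simp only []
    rw [loop1_spec]
    rw [dict_loop_spec]
    have hlen : (PySem.List.pyRange 0 n 1).length = n.toNat := by
      rw [PySem.List.length_pyRange_one]; omega
    rw [hlen, List.nil_append]
    rw [← refList_zero d m hm0 n.toNat]
    rw [loop2_spec d m n.toNat n (by omega) (by omega)]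
    refine List.map_congr_left (fun ii hii => ?_)
    rw [PySem.List.mem_pyRange_one] at hii
    have hget : PySem.List.pyGetD (refList d m (n - 1) n.toNat) ii 0
        = (ii + 1) * d + min (ii + 1) m := by
      rw [PySem.List.pyGetD_eq_getElem _ _ hii.1
        (by simp [length_refList]; omega)]
      rw [getElem_refList _ _ _ _ _ (by simp [length_refList]; omega)]
      rw [Int.toNat_of_nonneg hii.1, if_pos (by omega)]
    rw [hget]
  · have hneg : n < 0 := by omega
    rw [PySem.List.pyRange_one_eq_nil (show n ≤ 0 by omega),
        PySem.List.pyRange_one_eq_nil (show n ≤ 1 by omega)]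
    simp [PySem.Dict.empty]
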